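-- pv_equiv track=rewrite | github.com/khaihung2403/khaihung2403.io | Lab02.py | ex_dict4
-- ===== SOURCE A (Python) =====
-- def ex_dict4(d: dict):
--     dict1 = ['']
--     for key in d:
--         result = []
--         for num in dict1:
--             for value in d[key]:
--                 result.append(num + value)
--         dict1 = result
--     dict2 = set(dict1)
--     return dict2
-- ===== SOURCE B (Python) =====
-- def ex_dict4(d: dict):
--     values = list(d.values())
--
--     def combos(i):
--         if i == len(values):
--             return ['']
--         tails = combos(i + 1)
--         return [v + t for v in values[i] for t in tails]
--
--     return set(combos(0))
-- ===== Notes on version B (the rewrite author's own statement) =====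
-- stated objective: alternative
-- what changed: Replaces A's iterative prefix-accumulator (rebuilding the whole result list once per key) by a recursion over the value lists that builds each concatenation once from suffix combinations, with no running accumulator.
import Mathlib
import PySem

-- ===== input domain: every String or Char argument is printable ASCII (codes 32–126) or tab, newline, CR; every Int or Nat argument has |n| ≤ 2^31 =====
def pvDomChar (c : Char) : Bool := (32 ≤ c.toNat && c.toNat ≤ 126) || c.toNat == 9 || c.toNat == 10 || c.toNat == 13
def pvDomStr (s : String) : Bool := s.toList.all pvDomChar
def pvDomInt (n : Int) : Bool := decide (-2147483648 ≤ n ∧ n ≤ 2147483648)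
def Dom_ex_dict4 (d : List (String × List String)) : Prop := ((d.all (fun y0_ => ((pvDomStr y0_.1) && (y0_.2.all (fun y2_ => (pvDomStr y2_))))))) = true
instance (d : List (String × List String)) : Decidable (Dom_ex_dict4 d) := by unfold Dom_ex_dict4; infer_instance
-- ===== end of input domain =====

-- B builds each concatenation once from suffix combinations by recursion; A rebuilds a running
-- prefix list once per key. Same exact set value; no speed claim.

-- Python 'a + b' on strings, exact (list-level concatenation of the characters)
def strCat (a b : String) : String := String.ofList (a.toList ++ b.toList)

-- ===== PORT A =====
def ex_dict4 (d : List (String × List String)) : List String :=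
  PySem.Set.ofList
    ((PySem.Dict.ofList d).keys.foldl
      (fun dict1 key =>
        dict1.foldl
          (fun result num =>
            ((PySem.Dict.ofList d).getD key []).foldl
              (fun result value => result ++ [strCat num value]) result)
          [])
      [""])

-- ===== PORT B =====
def combosB : List (List String) → List String
  | [] => [""]
  | vs :: rest =>
    let tails := combosB rest
    vs.flatMap (fun v => tails.map (fun t => strCat v t))

def ex_dict4_alt (d : List (String × List String)) : List String :=
  PySem.Set.ofList (combosB (PySem.Dict.ofList d).values)

-- ===== PRECONDITION & SPEC =====
def Spec_ex_dict4 (d : List (String × List String)) (out : List String) : Prop := out = ex_dict4_alt d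
instance (d : List (String × List String)) (out : List String) : Decidable (Spec_ex_dict4 d out) := by unfold Spec_ex_dict4; infer_instance

-- ===== CLAIM (what is proved, stated in full; the proofs are below) =====
def Claim_equal_ex_dict4 : Prop := ∀ (d : List (String × List String)), Dom_ex_dict4 d → Spec_ex_dict4 d (ex_dict4 d)

-- ===== LEMMAS AND PROOFS =====

theorem strCat_assoc (a b c : String) : strCat (strCat a b) c = strCat a (strCat b c) := by
  simp [strCat]

theorem strCat_empty_right (a : String) : strCat a "" = a := by
  simp [strCat, String.ofList_toList]

theorem strCat_empty_left (a : String) : strCat "" a = a := by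
  simp [strCat, String.ofList_toList]

-- A's outer loop, rewritten over the value lists, equals prefixing every suffix combination.
theorem foldl_step_eq_combos (L : List (List String)) (init : List String) :
    L.foldl
      (fun dict1 vs =>
        dict1.foldl
          (fun result num => vs.foldl (fun result value => result ++ [strCat num value]) result)
          [])
      init
      = init.flatMap (fun num => (combosB L).map (fun t => strCat num t)) := by
  induction L generalizing init with
  | nil =>
    simp [combosB, strCat_empty_right]
  | cons vs rest ih =>
    simp only [List.foldl_cons]
    rw [ih]
    simp only [PySem.List.foldl_append_singleton_eq_map, combosB]
    rw [PySem.List.foldl_append_eq_flatMap]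
    rw [List.nil_append, List.flatMap_assoc]
    congr 1
    funext num
    simp [List.flatMap_map, List.map_flatMap, List.map_map, Function.comp_def, strCat_assoc]

-- fold over keys with getD = fold over values (keys of a Dict are nodup)
theorem keys_foldl_getD {α : Type} (dd : PySem.Dict String (List String))
    (hnd : dd.keys.Nodup) (g : α → List String → α) (init : α) :
    dd.keys.foldl (fun acc key => g acc (dd.getD key [])) init = dd.values.foldl g init := by
  show (dd.items.map Prod.fst).foldl _ init = (dd.items.map Prod.snd).foldl g init
  rw [List.foldl_map, List.foldl_map]
  apply PySem.List.foldl_congr_mem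
  intro acc p hp
  obtain ⟨k, v⟩ := p
  rw [PySem.Dict.getD_of_mem_items dd hp hnd]

theorem ex_dict4_eq_alt (d : List (String × List String)) : ex_dict4 d = ex_dict4_alt d := by
  unfold ex_dict4 ex_dict4_alt
  have h1 := keys_foldl_getD (PySem.Dict.ofList d) (PySem.Dict.nodup_keys_ofList d)
      (fun dict1 vs => dict1.foldl (fun result num =>
        vs.foldl (fun result value => result ++ [strCat num value]) result) []) [""]
  have h2 := foldl_step_eq_combos (PySem.Dict.ofList d).values [""]
  have h3 : ([""] : List String).flatMap
      (fun num => (combosB (PySem.Dict.ofList d).values).map (fun t => strCat num t))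
      = combosB (PySem.Dict.ofList d).values := by
    simp [strCat_empty_left]
  exact congrArg PySem.Set.ofList (h1.trans (h2.trans h3))

-- ===== VERDICT (by name: the statement is the Claim_ definition above) =====
theorem ex_dict4_spec : Claim_equal_ex_dict4 := by
  intro d _
  unfold Spec_ex_dict4
  exact ex_dict4_eq_alt d
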